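-- pv_equiv track=rewrite | github.com/KisloTAooAnkit/Python-Programs | Contest/2-Oct/second.py | maxCountOFTrues
-- ===== SOURCE A (Python) =====
-- def maxCountOFTrues(arr,k):
--     maxTrueCount = 0
--     start = 0
--     falseC = 0
--
--     for end in range(0,len(arr)):
--         if(arr[end] == "F"):
--             falseC +=1
--
--         while(falseC>k):
--             if arr[start] == "F":
--                 falseC-=1
--             start +=1
--         maxTrueCount = max(maxTrueCount,end-start+1)
--     return maxTrueCount
-- ===== SOURCE B (Python) =====
-- def maxCountOFTrues(arr, k):
--     start = 0
--     falseC = 0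
--     for x in arr:
--         if x == "F":
--             falseC += 1
--         if falseC > k:
--             if arr[start] == "F":
--                 falseC -= 1
--             start += 1
--     return len(arr) - start
-- ===== Notes on version B (the rewrite author's own statement) =====
-- stated objective: simpler
-- what changed: Replaces the shrinking window with running-max tracking by the non-shrinking sliding window: the inner while loop becomes a single if that advances start at most once per element, the per-element max update disappears, and the answer is read off as len(arr)-start.
import Mathlib
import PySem

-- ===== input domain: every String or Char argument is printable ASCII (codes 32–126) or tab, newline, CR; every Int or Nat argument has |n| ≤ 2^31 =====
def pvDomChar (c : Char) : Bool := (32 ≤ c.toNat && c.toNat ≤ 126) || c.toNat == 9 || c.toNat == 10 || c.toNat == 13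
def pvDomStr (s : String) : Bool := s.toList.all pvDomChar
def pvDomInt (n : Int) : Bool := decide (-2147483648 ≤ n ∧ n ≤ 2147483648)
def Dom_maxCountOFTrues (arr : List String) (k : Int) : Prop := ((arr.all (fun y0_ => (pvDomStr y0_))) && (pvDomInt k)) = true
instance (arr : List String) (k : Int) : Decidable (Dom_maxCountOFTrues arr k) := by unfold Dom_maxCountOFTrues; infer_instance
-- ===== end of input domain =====

-- B replaces A's shrinking window + running max by the non-shrinking sliding window
-- (single `if` instead of the inner `while`, no max tracking, answer = len(arr) - start): simpler, same O(n) cost.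

-- ===== PORT A =====
-- A's inner `while(falseC>k)` loop; fuel only makes the recursion total,
-- `none` from pyGet? is Python's IndexError (unreachable inside Pre_).
def shrinkA (arr : List String) (k : Int) : Nat → Int → Int → Int × Int
  | 0, s, f => (s, f)
  | fu+1, s, f =>
    if k < f then
      match PySem.List.pyGet? arr s with
      | none => (s, f)
      | some v => shrinkA arr k fu (s + 1) (if v == "F" then f - 1 else f)
    else (s, f)

-- one iteration of A's `for end in range(0,len(arr))` body; state = (maxTrueCount, start, falseC)
def stepA (arr : List String) (k : Int) (st : Int × Int × Int) (e : Nat) : Int × Int × Int :=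
  let f := if arr.getD e "" == "F" then st.2.2 + 1 else st.2.2
  let sf := shrinkA arr k (arr.length + 1) st.2.1 f
  (max st.1 ((e : Int) - sf.1 + 1), sf.1, sf.2)

def maxCountOFTrues (arr : List String) (k : Int) : Int :=
  ((List.range arr.length).foldl (stepA arr k) (0, 0, 0)).1

-- ===== PORT B =====
-- one iteration of B's `for x in arr` body; state = (start, falseC)
def stepB (arr : List String) (k : Int) (st : Int × Int) (x : String) : Int × Int :=
  let f := if x == "F" then st.2 + 1 else st.2
  if k < f then (st.1 + 1, if PySem.List.pyGetD arr st.1 "" == "F" then f - 1 else f)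
  else (st.1, f)

def maxCountOFTrues_alt (arr : List String) (k : Int) : Int :=
  (arr.length : Int) - (arr.foldl (stepB arr k) (0, 0)).1

-- ===== PRECONDITION & SPEC =====
-- Pre_ excludes exactly the inputs where Python A raises IndexError: k < 0 with a
-- nonempty array makes A's while loop walk `start` past the end of the array.
def Pre_maxCountOFTrues (arr : List String) (k : Int) : Prop := 0 ≤ k ∨ arr = []
instance (arr : List String) (k : Int) : Decidable (Pre_maxCountOFTrues arr k) := by unfold Pre_maxCountOFTrues; infer_instance
def pvWitness_maxCountOFTrues : List String × Int := (["T", "F", "T"], 1)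

def Spec_maxCountOFTrues (arr : List String) (k : Int) (out : Int) : Prop := out = maxCountOFTrues_alt arr k
instance (arr : List String) (k : Int) (out : Int) : Decidable (Spec_maxCountOFTrues arr k out) := by unfold Spec_maxCountOFTrues; infer_instance

-- ===== CLAIM (what is proved, stated in full; the proofs are below) =====
def Claim_equal_maxCountOFTrues : Prop := ∀ (arr : List String) (k : Int), Dom_maxCountOFTrues arr k → Pre_maxCountOFTrues arr k → Spec_maxCountOFTrues arr k (maxCountOFTrues arr k)

-- ===== LEMMAS AND PROOFS =====

-- number of "F" entries among indices [s, m) of arr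
def cntW (arr : List String) (s m : Nat) : Int := (((arr.take m).drop s).count "F" : Nat)

theorem cntW_mono (arr : List String) {s s' : Nat} (m : Nat) (h : s ≤ s') :
    cntW arr s' m ≤ cntW arr s m := by
  unfold cntW
  have e : (arr.take m).drop s' = ((arr.take m).drop s).drop (s' - s) := by
    rw [List.drop_drop]; congr 1; omega
  rw [e]
  exact_mod_cast (List.drop_sublist _ _).count_le _

theorem cntW_ge (arr : List String) {s m : Nat} (h : m ≤ s) : cntW arr s m = 0 := by
  unfold cntW
  rw [List.drop_eq_nil_of_le (by simp; omega)]
  simp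

theorem cntW_extend (arr : List String) {s m : Nat} (hm : m < arr.length) (hs : s ≤ m) :
    cntW arr s (m + 1) = cntW arr s m + (if arr.getD m "" == "F" then 1 else 0) := by
  unfold cntW
  rw [List.take_add_one, List.getElem?_eq_getElem hm]
  rw [List.drop_append_of_le_length (by simp; omega)]
  rw [List.count_append]
  have : arr.getD m "" = arr[m] := List.getD_eq_getElem arr "" hm
  rw [this]
  by_cases hf : arr[m] == "F" <;> simp [hf, List.count_singleton]

theorem cntW_popfront (arr : List String) {s m : Nat} (hs : s < m) (hm : m ≤ arr.length) :
    cntW arr s m = (if arr.getD s "" == "F" then 1 else 0) + cntW arr (s + 1) m := by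
  unfold cntW
  have hsl : s < (arr.take m).length := by simp; omega
  rw [List.drop_eq_getElem_cons hsl, List.count_cons]
  have hsa : s < arr.length := by omega
  have : (arr.take m)[s] = arr[s] := List.getElem_take
  rw [this]
  have : arr.getD s "" = arr[s] := List.getD_eq_getElem arr "" hsa
  rw [this]
  by_cases hf : arr[s] == "F" <;> (simp [hf]; try omega)

theorem shrinkA_char (arr : List String) (k : Int) (hk : 0 ≤ k) {m : Nat}
    (hm : m ≤ arr.length) :
    ∀ (fuel a : Nat), a ≤ m → m + 1 - a ≤ fuel →
    ∃ a' : Nat, shrinkA arr k fuel (a : Int) (cntW arr a m) = ((a' : Int), cntW arr a' m) ∧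
      a ≤ a' ∧ a' ≤ m ∧ cntW arr a' m ≤ k ∧ (∀ s, a ≤ s → s < a' → k < cntW arr s m) := by
  intro fuel
  induction fuel with
  | zero => intro a ha hf; omega
  | succ fu ih =>
    intro a ha hf
    by_cases hcase : k < cntW arr a m
    · have ham : a < m := by
        rcases Nat.lt_or_ge a m with h | h
        · exact h
        · rw [cntW_ge arr h] at hcase; omega
      have hal : a < arr.length := by omega
      have hget : PySem.List.pyGet? arr (a : Int) = some arr[a] := by
        rw [PySem.List.pyGet?_natCast, List.getElem?_eq_getElem hal]
      have hf' : (if arr[a] == "F" then cntW arr a m - 1 else cntW arr a m) = cntW arr (a + 1) m := by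
        have := cntW_popfront arr ham hm
        rw [List.getD_eq_getElem arr "" hal] at this
        by_cases hx : arr[a] == "F" <;> simp [hx] at this ⊢ <;> omega
      have hstep : shrinkA arr k (fu + 1) (a : Int) (cntW arr a m)
          = shrinkA arr k fu ((a + 1 : Nat) : Int) (cntW arr (a + 1) m) := by
        simp only [shrinkA, if_pos hcase, hget, hf']
        push_cast
        ring_nf
      obtain ⟨a', h1, h2, h3, h4, h5⟩ := ih (a + 1) (by omega) (by omega)
      refine ⟨a', by rw [hstep]; exact h1, by omega, h3, h4, ?_⟩
      intro s hs1 hs2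
      rcases Nat.eq_or_lt_of_le hs1 with rfl | h
      · exact hcase
      · exact h5 s h hs2
    · exact ⟨a, by simp only [shrinkA, if_neg hcase], le_rfl, ha, not_lt.mp hcase, by omega⟩

theorem inv_main (arr : List String) (k : Int) (hk : 0 ≤ k) :
    ∀ m, m ≤ arr.length →
    ∃ a b : Nat,
      (List.range m).foldl (stepA arr k) (0, 0, 0) = ((m : Int) - b, (a : Int), cntW arr a m) ∧
      (arr.take m).foldl (stepB arr k) (0, 0) = ((b : Int), cntW arr b m) ∧
      b ≤ a ∧ a ≤ m ∧ cntW arr a m ≤ k ∧ (∀ s, s < a → k < cntW arr s m) := by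
  intro m
  induction m with
  | zero =>
    intro _
    refine ⟨0, 0, ?_, ?_, le_rfl, le_rfl, ?_, by omega⟩
    · simp [cntW]
    · simp [cntW]
    · rw [cntW_ge arr le_rfl]; exact hk
  | succ m ih =>
    intro hm1
    have hm : m < arr.length := by omega
    obtain ⟨a, b, hA, hB, hba, ham, hak, hmin⟩ := ih (by omega)
    -- unfold one step on each side
    have hAstep : (List.range (m + 1)).foldl (stepA arr k) (0, 0, 0)
        = stepA arr k ((m : Int) - b, (a : Int), cntW arr a m) m := by
      rw [List.range_succ, List.foldl_append, hA]; rfl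
    have hBstep : (arr.take (m + 1)).foldl (stepB arr k) (0, 0)
        = stepB arr k ((b : Int), cntW arr b m) arr[m] := by
      rw [List.take_add_one, List.getElem?_eq_getElem hm, Option.toList_some,
        List.foldl_append, hB]; rfl
    set x := arr.getD m "" with hx
    have hxm : arr[m] = x := (List.getD_eq_getElem arr "" hm).symm
    have hfa : (if x == "F" then cntW arr a m + 1 else cntW arr a m) = cntW arr a (m + 1) := by
      rw [cntW_extend arr hm ham, ← hx]; split_ifs <;> omega
    have hfb : (if x == "F" then cntW arr b m + 1 else cntW arr b m) = cntW arr b (m + 1) := by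
      rw [cntW_extend arr hm (by omega), ← hx]; split_ifs <;> omega
    obtain ⟨a', hsh, haa', ha'm, ha'k, ha'min⟩ :=
      shrinkA_char arr k hk (m := m + 1) (by omega) (arr.length + 1) a (by omega) (by omega)
    -- combined minimality for the new prefix
    have hminN : ∀ s, s < a' → k < cntW arr s (m + 1) := by
      intro s hs
      rcases Nat.lt_or_ge s a with h | h
      · have h1 := hmin s h
        have h2 : cntW arr s m ≤ cntW arr s (m + 1) := by
          rw [cntW_extend arr hm (by omega), ← hx]
          split_ifs <;> omega
        omega
      · exact ha'min s h hs
    have hAval : stepA arr k ((m : Int) - b, (a : Int), cntW arr a m) m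
        = (max ((m : Int) - b) ((m : Int) - a' + 1), (a' : Int), cntW arr a' (m + 1)) := by
      simp only [stepA, ← hx, hfa, hsh]
    by_cases hcb : k < cntW arr b (m + 1)
    · -- B advances: b' = b + 1
      have hba' : b < a' := by
        rcases Nat.lt_or_ge b a' with h | h
        · exact h
        · have := cntW_mono arr (m + 1) h; omega
      have hblt : b < m + 1 := by omega
      have hfb' : (if PySem.List.pyGetD arr (b : Int) "" == "F" then cntW arr b (m + 1) - 1
          else cntW arr b (m + 1)) = cntW arr (b + 1) (m + 1) := by
        rw [PySem.List.pyGetD_natCast]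
        have := cntW_popfront arr hblt (by omega)
        split_ifs at this ⊢ <;> omega
      refine ⟨a', b + 1, ?_, ?_, by omega, ha'm, ha'k, hminN⟩
      · rw [hAstep, hAval]
        have h1 : max ((m : Int) - b) ((m : Int) - a' + 1) = ((m + 1 : Nat) : Int) - ((b + 1 : Nat) : Int) := by
          rw [max_eq_left (by omega)]; push_cast; ring
        rw [h1]
      · rw [hBstep]
        simp only [stepB, hxm, hfb, if_pos hcb, hfb']
        have h2 : (b : Int) + 1 = ((b + 1 : Nat) : Int) := by push_cast; ring
        rw [h2]
    · -- B stays: a' = b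
      have hab : a' = b := by
        rcases Nat.lt_or_ge b a' with h | h
        · exact absurd (hminN b h) hcb
        · omega
      refine ⟨a', b, ?_, ?_, by omega, by omega, ha'k, hminN⟩
      · rw [hAstep, hAval, hab]
        have h1 : max ((m : Int) - b) ((m : Int) - b + 1) = ((m + 1 : Nat) : Int) - (b : Int) := by
          rw [max_eq_right (by omega)]; push_cast; ring
        rw [h1]
      · rw [hBstep]
        simp only [stepB, hxm, hfb, if_neg hcb]

-- ===== VERDICT (by name: the statement is the Claim_ definition above) =====
theorem maxCountOFTrues_spec : Claim_equal_maxCountOFTrues := by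
  intro arr k _ hpre
  unfold Spec_maxCountOFTrues maxCountOFTrues maxCountOFTrues_alt
  rcases hpre with hk | rfl
  · obtain ⟨a, b, hA, hB, -⟩ := inv_main arr k hk arr.length le_rfl
    rw [hA, List.take_length] at *
    rw [hB]
  · simp
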